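-- pv_equiv track=rewrite | github.com/miliar/Code_Jam_Webscraper | solutions_python/Problem_45/79.py | minbribe
-- ===== SOURCE A (Python) =====
-- def minbribe(P,Q,cells):
--     result = 0
--     while len(cells)>=1:
--         costs = costallcells(cells,P)
--         mincost = min(costs)
--         minind = costs.index(mincost)
--         result += mincost
--         cells[minind:minind+1]=[]
--     return result
--
-- def costallcells(cells,P):
--     if len(cells)==1:
--         return [P-1]
--     cost = list(range(len(cells)))
--     for i,c in enumerate(cells):
--         if i==0:
--             cost[i]=max(c-1,0)+cells[i+1]-c-1
--         elif i==len(cells)-1: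
--             cost[i] = c-cells[i-1]-1+P-c
--         else:
--             cost[i] = cells[i+1]-cells[i-1]-2
--     return cost
-- ===== SOURCE B (Python) =====
-- def minbribe(P, Q, cells):
--     # Incremental greedy: keep the per-cell bribe costs in a list maintained across
--     # rounds -- a removal only changes the costs of its two neighbours, so each round
--     # patches at most two entries instead of rebuilding the whole cost list.
--     cs = list(cells)
--
--     def cost(i):
--         m = len(cs)
--         if m == 1:
--             return P - 1
--         if i == 0:
--             return max(cs[0] - 1, 0) + cs[1] - cs[0] - 1
--         if i == m - 1:
--             return P - cs[m - 2] - 1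
--         return cs[i + 1] - cs[i - 1] - 2
--
--     costs = [cost(i) for i in range(len(cs))]
--     total = 0
--     while cs:
--         m = min(costs)
--         i = costs.index(m)
--         total += m
--         del cs[i]
--         del costs[i]
--         if costs:
--             if len(cs) == 1:
--                 costs[0] = P - 1
--             else:
--                 if i < len(cs):
--                     costs[i] = cost(i)
--                 if i > 0:
--                     costs[i - 1] = cost(i - 1)
--     return total
-- ===== Notes on version B (the rewrite author's own statement) =====
-- stated objective: faster
-- what changed: B builds the per-cell cost list once and, after each removal, patches only the two neighbouring cost entries, where A rebuilds the entire cost list from scratch every round.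
import Mathlib
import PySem

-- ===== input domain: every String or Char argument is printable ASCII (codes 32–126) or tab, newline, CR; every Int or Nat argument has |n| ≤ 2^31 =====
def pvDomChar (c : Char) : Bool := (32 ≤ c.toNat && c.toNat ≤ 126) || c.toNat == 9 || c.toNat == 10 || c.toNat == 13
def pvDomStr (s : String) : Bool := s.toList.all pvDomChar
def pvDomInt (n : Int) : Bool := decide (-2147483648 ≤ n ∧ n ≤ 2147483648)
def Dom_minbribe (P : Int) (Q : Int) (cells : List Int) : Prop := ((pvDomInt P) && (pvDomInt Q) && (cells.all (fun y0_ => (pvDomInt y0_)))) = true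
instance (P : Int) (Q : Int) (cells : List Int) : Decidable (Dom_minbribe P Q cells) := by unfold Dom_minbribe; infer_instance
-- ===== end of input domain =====

-- B keeps the per-cell cost list across rounds and patches only the two neighbours of a
-- removal, where A rebuilds the whole cost list every round; measured faster at the large
-- sizes. Return-value equivalence only: A empties its 'cells' argument in place, B does not
-- mutate its argument. Both while-loops are ported with fuel = cells.length, the exact
-- number of iterations (each round removes exactly one cell), purely as a totality guard.

-- ===== PORT A =====
-- Python builds cost = list(range(n)) and then overwrites every entry cost[i] in the loop;
-- the map over enumerate produces exactly those per-index values.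
def costallcells (cells : List Int) (P : Int) : List Int :=
  if cells.length = 1 then [P - 1]
  else (PySem.List.enumerate cells 0).map (fun ic =>
    if ic.1 = 0 then
      max (ic.2 - 1) 0 + PySem.List.pyGetD cells (ic.1 + 1) 0 - ic.2 - 1
    else if ic.1 = (cells.length : Int) - 1 then
      ic.2 - PySem.List.pyGetD cells (ic.1 - 1) 0 - 1 + P - ic.2
    else
      PySem.List.pyGetD cells (ic.1 + 1) 0 - PySem.List.pyGetD cells (ic.1 - 1) 0 - 2)

-- 'while len(cells) >= 1': one fuel unit per iteration
def minbribeGo (P : Int) (fuel : Nat) (cells : List Int) (result : Int) : Int :=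
  match fuel with
  | 0 => result
  | fuel + 1 =>
    if 1 ≤ cells.length then
      -- Python's locals costs / mincost / minind, inlined
      minbribeGo P fuel
        (cells.take ((PySem.List.index? (costallcells cells P) ((PySem.List.min? (costallcells cells P) (fun x => x)).getD 0)).getD 0)
          ++ cells.drop (((PySem.List.index? (costallcells cells P) ((PySem.List.min? (costallcells cells P) (fun x => x)).getD 0)).getD 0) + 1))
        (result + (PySem.List.min? (costallcells cells P) (fun x => x)).getD 0)
    else result

def minbribe (P : Int) (Q : Int) (cells : List Int) : Int :=
  minbribeGo P cells.length cells 0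

-- ===== PORT B =====
-- B's cost(i) closure over the current cs
def altCost (P : Int) (cs : List Int) (i : Nat) : Int :=
  if cs.length = 1 then P - 1
  else if i = 0 then
    max (PySem.List.pyGetD cs 0 0 - 1) 0 + PySem.List.pyGetD cs 1 0 - PySem.List.pyGetD cs 0 0 - 1
  else if i = cs.length - 1 then
    P - PySem.List.pyGetD cs ((cs.length : Int) - 2) 0 - 1
  else
    PySem.List.pyGetD cs ((i : Int) + 1) 0 - PySem.List.pyGetD cs ((i : Int) - 1) 0 - 2

-- 'if costs: …' — repair the ≤ 2 cost entries affected by deleting index i (cs is the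
-- already-shortened cell list, costs the already-shortened cost list)
def altPatch (P : Int) (i : Nat) (cs : List Int) (costs : List Int) : List Int :=
  if costs.length = 0 then costs
  else if cs.length = 1 then costs.set 0 (P - 1)
  else
    let costs1 := if i < cs.length then costs.set i (altCost P cs i) else costs
    if 0 < i then costs1.set (i - 1) (altCost P cs (i - 1)) else costs1

-- 'while cs': one fuel unit per iteration
def minbribeAltGo (P : Int) (fuel : Nat) (cs : List Int) (costs : List Int) (total : Int) : Int :=
  match fuel with
  | 0 => total
  | fuel + 1 =>
    match cs with
    | [] => total
    | c :: rest =>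
      -- Python's locals m / i and the two 'del' statements, inlined
      minbribeAltGo P fuel
        ((c :: rest : List Int).take ((PySem.List.index? costs ((PySem.List.min? costs (fun x => x)).getD 0)).getD 0)
          ++ (c :: rest : List Int).drop (((PySem.List.index? costs ((PySem.List.min? costs (fun x => x)).getD 0)).getD 0) + 1))
        (altPatch P ((PySem.List.index? costs ((PySem.List.min? costs (fun x => x)).getD 0)).getD 0)
          ((c :: rest : List Int).take ((PySem.List.index? costs ((PySem.List.min? costs (fun x => x)).getD 0)).getD 0)
            ++ (c :: rest : List Int).drop (((PySem.List.index? costs ((PySem.List.min? costs (fun x => x)).getD 0)).getD 0) + 1))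
          (costs.take ((PySem.List.index? costs ((PySem.List.min? costs (fun x => x)).getD 0)).getD 0)
            ++ costs.drop (((PySem.List.index? costs ((PySem.List.min? costs (fun x => x)).getD 0)).getD 0) + 1)))
        (total + (PySem.List.min? costs (fun x => x)).getD 0)

def minbribe_alt (P : Int) (Q : Int) (cells : List Int) : Int :=
  minbribeAltGo P cells.length cells ((List.range cells.length).map (altCost P cells)) 0

-- ===== PRECONDITION & SPEC =====
def Spec_minbribe (P : Int) (Q : Int) (cells : List Int) (out : Int) : Prop := out = minbribe_alt P Q cells
instance (P : Int) (Q : Int) (cells : List Int) (out : Int) : Decidable (Spec_minbribe P Q cells out) := by unfold Spec_minbribe; infer_instance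

-- ===== CLAIM (what is proved, stated in full; the proofs are below) =====
def Claim_equal_minbribe : Prop := ∀ (P : Int) (Q : Int) (cells : List Int), Dom_minbribe P Q cells → Spec_minbribe P Q cells (minbribe P Q cells)

-- ===== LEMMAS AND PROOFS =====

theorem costallcells_length (cells : List Int) (P : Int) (h : cells ≠ []) :
    (costallcells cells P).length = cells.length := by
  unfold costallcells
  split_ifs with h1
  · simp [h1]
  · simp [PySem.List.length_enumerate]

theorem costallcells_nil (P : Int) : costallcells [] P = [] := by
  unfold costallcells
  simp

theorem minind_lt_length (costs : List Int) (h : costs ≠ []) :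
    ((PySem.List.index? costs ((PySem.List.min? costs (fun x => x)).getD 0)).getD 0) < costs.length := by
  obtain ⟨m, hm⟩ : ∃ m, PySem.List.min? costs (fun x => x) = some m := by
    cases hmin : PySem.List.min? costs (fun x => x) with
    | none => exact absurd ((PySem.List.min?_eq_none_iff _ _).mp hmin) h
    | some m => exact ⟨m, rfl⟩
  have hmem := PySem.List.min?_mem hm
  obtain ⟨k, hk⟩ : ∃ k, PySem.List.index? costs m = some k := by
    cases hidx : PySem.List.index? costs m with
    | none => exact absurd ((PySem.List.index?_eq_none_iff _ _).mp hidx) (by simp [hmem])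
    | some k => exact ⟨k, rfl⟩
  obtain ⟨hk2, -, -⟩ := PySem.List.getElem_of_index?_eq_some hk
  rw [hm]
  simp only [Option.getD_some]
  rw [hk]
  simpa using hk2

-- A's per-index cost values, characterised as a function of the index
theorem costs_getD (cs : List Int) (P : Int) (h2 : 2 ≤ cs.length) (i : Nat) (hi : i < cs.length) :
    (costallcells cs P).getD i 0 =
      if i = 0 then max (cs.getD 0 0 - 1) 0 + cs.getD 1 0 - cs.getD 0 0 - 1
      else if i = cs.length - 1 then cs.getD i 0 - cs.getD (i-1) 0 - 1 + P - cs.getD i 0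
      else cs.getD (i+1) 0 - cs.getD (i-1) 0 - 2 := by
  unfold costallcells
  rw [if_neg (by omega)]
  rw [List.getD_eq_getElem?_getD, List.getElem?_map, PySem.List.getElem?_enumerate,
      List.getElem?_eq_getElem hi]
  simp only [Option.map_some, Option.getD_some, zero_add]
  by_cases h0 : i = 0
  · subst h0
    rw [if_pos (by norm_num), if_pos rfl]
    rw [show ((0:Nat):Int) + 1 = ((1:Nat):Int) by norm_num, PySem.List.pyGetD_natCast]
    simp [List.getD, List.getElem?_eq_getElem hi]
  · rw [if_neg (by exact_mod_cast h0), if_neg h0]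
    have hp1 : ((i:Int) + 1) = (((i+1 : Nat)) : Int) := by push_cast; ring
    have hm1 : ((i:Int) - 1) = (((i-1 : Nat)) : Int) := by omega
    rw [hp1, hm1, PySem.List.pyGetD_natCast, PySem.List.pyGetD_natCast]
    by_cases hl : i = cs.length - 1
    · rw [if_pos (by omega), if_pos hl]
      rw [List.getD_eq_getElem _ _ hi]
    · rw [if_neg (by omega), if_neg hl]

-- B's cost(i) is A's cost at index i, for every valid index
theorem altCost_eq (P : Int) (cs : List Int) (i : Nat) (hi : i < cs.length) :
    altCost P cs i = (costallcells cs P).getD i 0 := by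
  by_cases h1 : cs.length = 1
  · unfold altCost costallcells
    rw [if_pos h1, if_pos h1]
    have : i = 0 := by omega
    subst this
    rfl
  · have h2 : 2 ≤ cs.length := by omega
    rw [costs_getD cs P h2 i hi]
    unfold altCost
    rw [if_neg h1]
    by_cases h0 : i = 0
    · subst h0
      rw [if_pos rfl, if_pos rfl]
      rw [show ((1:Int)) = ((1:Nat):Int) by norm_num, PySem.List.pyGetD_natCast,
          PySem.List.pyGetD_zero]
    · rw [if_neg h0, if_neg h0]
      by_cases hl : i = cs.length - 1
      · rw [if_pos hl, if_pos hl]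
        rw [show ((cs.length : Int) - 2) = (((cs.length - 2 : Nat)) : Int) by omega,
            PySem.List.pyGetD_natCast]
        rw [show cs.length - 2 = i - 1 by omega]
        ring
      · rw [if_neg hl, if_neg hl]
        have hp1 : ((i:Int) + 1) = (((i+1 : Nat)) : Int) := by push_cast; ring
        have hm1 : ((i:Int) - 1) = (((i-1 : Nat)) : Int) := by omega
        rw [hp1, hm1, PySem.List.pyGetD_natCast, PySem.List.pyGetD_natCast]

-- B's initial comprehension builds exactly A's cost list
theorem init_costs (P : Int) (cs : List Int) :
    (List.range cs.length).map (altCost P cs) = costallcells cs P := by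
  rcases eq_or_ne cs [] with h | hne
  · subst h; simp [costallcells_nil]
  · apply List.ext_getElem
    · simp [costallcells_length cs P hne]
    · intro j hj hj2
      rw [List.getElem_map, List.getElem_range]
      rw [altCost_eq P cs j (by simpa using hj)]
      rw [List.getD_eq_getElem _ _ hj2]

-- getD of a deleted list in terms of the original
theorem eraseIdx_getD (l : List Int) (i k : Nat) (hi : i < l.length) :
    (l.eraseIdx i).getD k 0 = if k < i then l.getD k 0 else l.getD (k+1) 0 := by
  have hlen : (l.eraseIdx i).length = l.length - 1 := by
    rw [List.length_eraseIdx]; simp [hi]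
  by_cases hk : k < (l.eraseIdx i).length
  · rw [List.getD_eq_getElem _ _ hk, List.getElem_eraseIdx hk]
    split_ifs with h
    · rw [List.getD_eq_getElem _ _ (by omega)]
    · rw [List.getD_eq_getElem _ _ (by omega)]
  · have hk' : l.length - 1 ≤ k := by omega
    rw [List.getD_eq_default _ _ (by omega), if_neg (by omega),
        List.getD_eq_default _ _ (by omega)]

-- an entry whose neighbours did not change keeps its cost across the deletion
theorem unpatched (P : Int) (cs : List Int) (i j : Nat) (hi : i < cs.length)
    (h3 : 3 ≤ cs.length) (hj : j < cs.length - 1) (htri : j + 1 < i ∨ i < j) :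
    ((costallcells cs P).eraseIdx i).getD j 0 = (costallcells (cs.eraseIdx i) P).getD j 0 := by
  have hne : cs ≠ [] := by intro h; subst h; simp at hi
  have hlc := costallcells_length cs P hne
  have h2 : 2 ≤ cs.length := by omega
  have hlen' : (cs.eraseIdx i).length = cs.length - 1 := by
    rw [List.length_eraseIdx]; simp [hi]
  have h2' : 2 ≤ (cs.eraseIdx i).length := by omega
  rw [eraseIdx_getD _ i j (by rw [hlc]; exact hi)]
  rw [costs_getD (cs.eraseIdx i) P h2' j (by omega)]
  rcases htri with hlt | hgt
  · -- j is left of the deleted index: old index j, no flag changes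
    rw [if_pos (by omega)]
    rw [costs_getD cs P h2 j (by omega)]
    by_cases j0 : j = 0
    · subst j0
      rw [if_pos rfl, if_pos rfl]
      rw [eraseIdx_getD cs i 0 hi, eraseIdx_getD cs i 1 hi,
          if_pos (by omega), if_pos (by omega)]
    · rw [if_neg j0, if_neg j0, if_neg (by omega), if_neg (by omega)]
      rw [eraseIdx_getD cs i (j+1) hi, eraseIdx_getD cs i (j-1) hi,
          if_pos (by omega), if_pos (by omega)]
  · -- j is right of the deleted index: old index j + 1
    rw [if_neg (by omega)]
    rw [costs_getD cs P h2 (j+1) (by omega)]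
    rw [if_neg (show ¬(j + 1 = 0) by omega), if_neg (show ¬(j = 0) by omega)]
    by_cases jl : j = (cs.eraseIdx i).length - 1
    · rw [if_pos (show j + 1 = cs.length - 1 by omega), if_pos jl]
      rw [eraseIdx_getD cs i j hi, eraseIdx_getD cs i (j-1) hi,
          if_neg (show ¬(j < i) by omega), if_neg (show ¬(j - 1 < i) by omega)]
      rw [show j + 1 - 1 = j by omega, show j - 1 + 1 = j by omega]
    · rw [if_neg (show ¬(j + 1 = cs.length - 1) by omega), if_neg jl]
      rw [eraseIdx_getD cs i (j+1) hi, eraseIdx_getD cs i (j-1) hi,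
          if_neg (show ¬(j + 1 < i) by omega), if_neg (show ¬(j - 1 < i) by omega)]
      rw [show j + 1 - 1 = j by omega, show j - 1 + 1 = j by omega]

-- deleting index i and repairing its neighbours yields exactly A's recomputed cost list
theorem patch_eq (P : Int) (cs : List Int) (i : Nat) (hi : i < cs.length) :
    altPatch P i (cs.eraseIdx i) ((costallcells cs P).eraseIdx i)
      = costallcells (cs.eraseIdx i) P := by
  have hne : cs ≠ [] := by intro h; subst h; simp at hi
  have hlc := costallcells_length cs P hne
  have hlen' : (cs.eraseIdx i).length = cs.length - 1 := by
    rw [List.length_eraseIdx]; simp [hi]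
  have hlenE : ((costallcells cs P).eraseIdx i).length = cs.length - 1 := by
    rw [List.length_eraseIdx]; simp [hlc, hi]
  by_cases h1 : cs.length = 1
  · -- the deleted lists are empty
    have hcs' : cs.eraseIdx i = [] := List.eq_nil_of_length_eq_zero (by omega)
    have hcosts' : (costallcells cs P).eraseIdx i = [] :=
      List.eq_nil_of_length_eq_zero (by omega)
    rw [hcs', hcosts', costallcells_nil]
    rfl
  by_cases h2 : cs.length = 2
  · -- one cell left: the patch sets the single entry to P - 1
    have hl1 : (cs.eraseIdx i).length = 1 := by omega
    obtain ⟨y, hy⟩ := List.length_eq_one_iff.mp (show ((costallcells cs P).eraseIdx i).length = 1 by omega)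
    unfold altPatch
    rw [hy]
    rw [if_neg (by simp), if_pos hl1]
    unfold costallcells
    rw [if_pos hl1]
    rfl
  · -- two or more cells left: pointwise comparison
    have h3 : 3 ≤ cs.length := by omega
    have h2' : 2 ≤ (cs.eraseIdx i).length := by omega
    have hcne' : cs.eraseIdx i ≠ [] := by
      intro h; rw [h] at hlen'; simp at hlen'; omega
    unfold altPatch
    rw [if_neg (by omega), if_neg (by omega)]
    apply List.ext_getElem
    · rw [costallcells_length _ P hcne', hlen']
      split_ifs <;> simp [hlenE]
    · intro j hj1 hj2
      have hj : j < cs.length - 1 := by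
        rw [costallcells_length _ P hcne', hlen'] at hj2; exact hj2
      have hjE : j < ((costallcells cs P).eraseIdx i).length := by omega
      split_ifs with hiron hzi hzi
      · -- i < len', 0 < i: both neighbours patched
        simp only [List.getElem_set]
        by_cases e1 : i - 1 = j
        · rw [if_pos e1]
          subst e1
          rw [altCost_eq P (cs.eraseIdx i) (i-1) (by omega), List.getD_eq_getElem _ _ hj2]
        · rw [if_neg e1]
          by_cases e2 : i = j
          · rw [if_pos e2]
            subst e2
            rw [altCost_eq P (cs.eraseIdx i) i (by omega), List.getD_eq_getElem _ _ hj2]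
          · rw [if_neg e2]
            rw [← List.getD_eq_getElem _ 0 hjE, ← List.getD_eq_getElem _ 0 hj2]
            exact unpatched P cs i j hi h3 hj (by omega)
      · -- i = 0: only the right neighbour is patched
        simp only [List.getElem_set]
        by_cases e2 : i = j
        · rw [if_pos e2]
          subst e2
          rw [altCost_eq P (cs.eraseIdx i) i (by omega), List.getD_eq_getElem _ _ hj2]
        · rw [if_neg e2]
          rw [← List.getD_eq_getElem _ 0 hjE, ← List.getD_eq_getElem _ 0 hj2]
          exact unpatched P cs i j hi h3 hj (by omega)
      · -- i = len' (last cell deleted), 0 < i: only the left neighbour is patched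
        simp only [List.getElem_set]
        by_cases e1 : i - 1 = j
        · rw [if_pos e1]
          subst e1
          rw [altCost_eq P (cs.eraseIdx i) (i-1) (by omega), List.getD_eq_getElem _ _ hj2]
        · rw [if_neg e1]
          rw [← List.getD_eq_getElem _ 0 hjE, ← List.getD_eq_getElem _ 0 hj2]
          exact unpatched P cs i j hi h3 hj (by omega)
      · -- i = 0 and i ≥ len' is impossible here (len' ≥ 2)
        omega

-- A = B, round by round: B's maintained cost list is always A's recomputed one
theorem go_eq (P : Int) : ∀ (fuel : Nat) (cells : List Int) (r : Int),
    minbribeGo P fuel cells r = minbribeAltGo P fuel cells (costallcells cells P) r := by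
  intro fuel
  induction fuel with
  | zero => intro cells r; rfl
  | succ fuel ih =>
    intro cells r
    match cells with
    | [] =>
      rw [minbribeGo, minbribeAltGo]
      simp
    | c :: rest =>
      have hne : (c :: rest : List Int) ≠ [] := by simp
      have hclen := costallcells_length (c :: rest) P hne
      have hcne : costallcells (c :: rest) P ≠ [] := by
        intro hn; rw [hn] at hclen; simp at hclen
      have hi := minind_lt_length (costallcells (c :: rest) P) hcne
      rw [hclen] at hi
      rw [minbribeGo, minbribeAltGo]
      rw [if_pos (show (1:Nat) ≤ (c :: rest : List Int).length by simp)]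
      rw [← List.eraseIdx_eq_take_drop_succ, ← List.eraseIdx_eq_take_drop_succ]
      rw [patch_eq P (c :: rest) _ hi]
      exact ih _ _

-- ===== VERDICT (by name: the statement is the Claim_ definition above) =====
theorem minbribe_spec : Claim_equal_minbribe := by
  intro P Q cells _
  unfold Spec_minbribe minbribe minbribe_alt
  rw [init_costs]
  exact go_eq P cells.length cells 0
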